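-- pv_equiv track=rewrite | github.com/pestopoppa/epyc-orchestrator | src/graph/helpers.py | _looks_like_prompt_echo
-- ===== SOURCE A (Python) =====
-- def _looks_like_prompt_echo(text: str) -> bool:
--     """Detect echoed prompt/instruction text that should never be rescued."""
--     hay = (text or "").lower()
--     markers = (
--         "answer with the letter only",
--         "answer with the",
--         "question:",
--         "options:",
--         "choose the correct",
--         "select the best",
--         "respond with",
--         "you are given",
--         "instruction:",
--     )
--     return any(m in hay for m in markers)
-- ===== SOURCE B (Python) =====
-- _MARKERS = (
--     "answer with the letter only",
--     "answer with the",
--     "question:",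
--     "options:",
--     "choose the correct",
--     "select the best",
--     "respond with",
--     "you are given",
--     "instruction:",
-- )
--
-- def _looks_like_prompt_echo(text: str) -> bool:
--     """Single left-to-right pass: at each position, does some marker start here?"""
--     hay = (text or "").lower()
--     for i in range(len(hay) + 1):
--         for m in _MARKERS:
--             if hay.startswith(m, i):
--                 return True
--     return False
-- ===== Notes on version B (the rewrite author's own statement) =====
-- stated objective: alternative
-- what changed: Replaced marker-major repeated substring searches (any(m in hay)) with one position-major left-to-right scan that checks at each index whether some marker starts there, returning early on the first hit.
import Mathlib
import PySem

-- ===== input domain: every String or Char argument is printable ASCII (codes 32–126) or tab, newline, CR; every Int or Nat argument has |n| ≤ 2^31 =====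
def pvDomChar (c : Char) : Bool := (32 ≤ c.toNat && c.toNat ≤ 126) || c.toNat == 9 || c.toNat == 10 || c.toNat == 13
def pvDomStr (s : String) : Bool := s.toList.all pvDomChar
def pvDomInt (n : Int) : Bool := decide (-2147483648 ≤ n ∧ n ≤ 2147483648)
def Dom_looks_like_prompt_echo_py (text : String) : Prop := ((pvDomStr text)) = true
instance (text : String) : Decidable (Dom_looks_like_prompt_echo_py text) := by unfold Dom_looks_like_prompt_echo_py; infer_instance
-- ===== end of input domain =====

-- B replaces A's marker-major `any(m in hay)` substring searches by one position-major
-- left-to-right scan checking at each index whether some marker starts there (alternative).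

-- ===== PORT A =====
def pvMarkersA : List String :=
  ["answer with the letter only", "answer with the", "question:", "options:",
   "choose the correct", "select the best", "respond with", "you are given", "instruction:"]

def looks_like_prompt_echo_py (text : String) : Bool :=
  let hay := PySem.Str.lower (if text = "" then "" else text)
  pvMarkersA.any (fun m => PySem.Str.isIn m hay)

-- ===== PORT B =====
def pvMarkersB : List (List Char) :=
  ["answer with the letter only".toList, "answer with the".toList, "question:".toList,
   "options:".toList, "choose the correct".toList, "select the best".toList,
   "respond with".toList, "you are given".toList, "instruction:".toList]

-- the scan over positions i = 0 .. len(hay): recursion over the suffix starting at i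
def pvEchoScan : List Char → Bool
  | [] => pvMarkersB.any (fun m => m.isPrefixOf ([] : List Char))
  | c :: rest => pvMarkersB.any (fun m => m.isPrefixOf (c :: rest)) || pvEchoScan rest

def looks_like_prompt_echo_py_alt (text : String) : Bool :=
  let hay := PySem.Str.lower (if text = "" then "" else text)
  pvEchoScan hay.toList

-- ===== PRECONDITION & SPEC =====
def Spec_looks_like_prompt_echo_py (text : String) (out : Bool) : Prop := out = looks_like_prompt_echo_py_alt text
instance (text : String) (out : Bool) : Decidable (Spec_looks_like_prompt_echo_py text out) := by unfold Spec_looks_like_prompt_echo_py; infer_instance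

-- ===== CLAIM (what is proved, stated in full; the proofs are below) =====
def Claim_equal_looks_like_prompt_echo_py : Prop := ∀ (text : String), Dom_looks_like_prompt_echo_py text → Spec_looks_like_prompt_echo_py text (looks_like_prompt_echo_py text)

-- ===== LEMMAS AND PROOFS =====

theorem pvEchoScan_iff (s : List Char) :
    pvEchoScan s = true ↔ ∃ m ∈ pvMarkersB, m <:+: s := by
  induction s with
  | nil =>
    simp [pvEchoScan, List.isPrefixOf_iff_prefix]
  | cons c rest ih =>
    simp only [pvEchoScan, Bool.or_eq_true, List.any_eq_true,
      List.isPrefixOf_iff_prefix, ih]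
    constructor
    · rintro (⟨m, hm, hp⟩ | ⟨m, hm, hi⟩)
      · exact ⟨m, hm, hp.isInfix⟩
      · exact ⟨m, hm, hi.trans (List.suffix_cons c rest).isInfix⟩
    · rintro ⟨m, hm, hi⟩
      rcases List.infix_cons_iff.mp hi with hp | hi'
      · exact Or.inl ⟨m, hm, hp⟩
      · exact Or.inr ⟨m, hm, hi'⟩

theorem pvMarkers_map : pvMarkersA.map String.toList = pvMarkersB := by decide

-- ===== VERDICT (by name: the statement is the Claim_ definition above) =====
theorem looks_like_prompt_echo_py_spec : Claim_equal_looks_like_prompt_echo_py := by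
  intro text _
  unfold Spec_looks_like_prompt_echo_py looks_like_prompt_echo_py looks_like_prompt_echo_py_alt
  simp only []
  set hay := PySem.Str.lower (if text = "" then "" else text) with hhay
  rw [Bool.eq_iff_iff, pvEchoScan_iff, ← pvMarkers_map, List.any_eq_true]
  constructor
  · rintro ⟨m, hm, hIn⟩
    refine ⟨m.toList, List.mem_map_of_mem hm, ?_⟩
    exact (PySem.Chars.isIn_iff_infix _ _).mp (by simpa [PySem.Str.isIn] using hIn)
  · rintro ⟨x, hx, hi⟩
    obtain ⟨m, hm, rfl⟩ := List.mem_map.mp hx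
    refine ⟨m, hm, ?_⟩
    simpa [PySem.Str.isIn] using (PySem.Chars.isIn_iff_infix _ _).mpr hi
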